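-- pv_equiv track=rewrite | github.com/vatsalpathak/OOD-LLD | Amozon discussion/team_analyzer.py | get_top_k_brute_force
-- ===== SOURCE A (Python) =====
-- from collections import defaultdict, deque
--
-- def get_top_k_brute_force(K, names, connections, scores):
--     name_to_index =  {name: i for i,name in enumerate(names)}
--     graph = defaultdict(list)
--
--     for u,v in connections:
--         graph[u].append(v)
--         graph[v].append(u)
--
--     visited = set()
--
--     result = []
--
--     def bfs(start):
--         team = []
--         queue = deque([start])
--         visited.add(start)
--
--         while queue:
--             player = queue.popleft()
--             team.append(player)
--             for neighbor in graph[player]: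
--                 if neighbor not in visited:
--                     visited.add(neighbor)
--                     queue.append(neighbor)
--         return team
--
--     for name in names:
--         if name not in visited:
--             team = bfs(name)
--
--             #score for the team
--             team_score = [scores[name_to_index[player]] for player in team]
--             top_k = sorted(team_score,reverse=True)[:K]
--             result.append(top_k)
--     return result
-- ===== SOURCE B (Python) =====
-- def get_top_k_brute_force(K, names, connections, scores):
--     idx = {name: i for i, name in enumerate(names)}
--     # union-find with label relabeling: comp maps each player to its component label
--     comp = {name: name for name in idx}
--     for u, v in connections:
--         ru, rv = comp[u], comp[v]
--         if ru != rv: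
--             for n in comp:
--                 if comp[n] == ru:
--                     comp[n] = rv
--     result = []
--     emitted = set()
--     for name in names:
--         r = comp[name]
--         if r not in emitted:
--             emitted.add(r)
--             team_scores = [scores[idx[n]] for n in comp if comp[n] == r]
--             result.append(sorted(team_scores, reverse=True)[:K])
--     return result
-- ===== Notes on version B (the rewrite author's own statement) =====
-- stated objective: alternative
-- what changed: Replaces BFS over an adjacency-list graph (queue, visited set, per-component graph traversal) with a label-merging union-find: one pass over the edges merges component labels, then one pass over names emits each component's top-K scores in first-encounter order.
-- outside the precondition, e.g. on get_top_k_brute_force(1, ['a'], [('x', 'y')], [5]): A returns [[5]], B raises KeyError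
import Mathlib
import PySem

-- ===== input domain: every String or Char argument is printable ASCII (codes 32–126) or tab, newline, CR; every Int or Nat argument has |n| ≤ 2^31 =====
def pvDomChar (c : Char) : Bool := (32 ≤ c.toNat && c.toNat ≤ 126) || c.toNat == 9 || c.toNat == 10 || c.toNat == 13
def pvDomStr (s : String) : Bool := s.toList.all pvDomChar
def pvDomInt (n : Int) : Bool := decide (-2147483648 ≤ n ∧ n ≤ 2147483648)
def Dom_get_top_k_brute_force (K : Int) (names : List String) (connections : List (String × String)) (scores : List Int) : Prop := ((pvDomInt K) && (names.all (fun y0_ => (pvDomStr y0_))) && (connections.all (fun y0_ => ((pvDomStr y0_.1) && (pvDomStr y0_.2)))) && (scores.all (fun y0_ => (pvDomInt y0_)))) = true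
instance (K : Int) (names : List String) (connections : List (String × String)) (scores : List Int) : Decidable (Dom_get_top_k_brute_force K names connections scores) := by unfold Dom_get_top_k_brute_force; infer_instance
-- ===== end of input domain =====

-- B replaces A's per-component BFS (adjacency dict + queue + visited set) by a label-merging
-- union-find over the edge list; same return value on Pre_ (objective: alternative, not faster).

-- ===== PORT A =====
-- name_to_index = {name: i for i, name in enumerate(names)}
def pvNameToIndex (names : List String) : PySem.Dict String Int :=
  (PySem.List.enumerate names 0).foldl (fun d p => d.insert p.2 p.1) PySem.Dict.empty

-- graph[u].append(v); graph[v].append(u)   (defaultdict(list))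
def pvGraphStep (g : PySem.Dict String (List String)) (c : String × String) :
    PySem.Dict String (List String) :=
  let g1 := g.insert c.1 (g.getD c.1 [] ++ [c.2])
  g1.insert c.2 (g1.getD c.2 [] ++ [c.1])

def pvGraph (connections : List (String × String)) : PySem.Dict String (List String) :=
  connections.foldl pvGraphStep PySem.Dict.empty

-- body of "for neighbor in graph[player]: if neighbor not in visited: …"
def pvBfsIns (st : PySem.Set String × List String) (neighbor : String) :
    PySem.Set String × List String :=
  if st.1.contains neighbor then st else (st.1.add neighbor, st.2 ++ [neighbor])

-- number of not-yet-visited graph nodes (termination measure only)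
def pvUnvis (univ : List String) (visited : PySem.Set String) : Nat :=
  (univ.filter (fun n => !(visited.contains n))).length

lemma pv_mem_getD_values (g : PySem.Dict String (List String)) (k x : String)
    (h : x ∈ g.getD k []) : x ∈ g.values.flatten := by
  rw [PySem.Dict.getD_eq_get?_getD] at h
  cases hg : g.get? k with
  | none => rw [hg] at h; simp at h
  | some v =>
      rw [hg] at h
      simp only [Option.getD_some] at h
      have hv : v ∈ g.values := by
        obtain ⟨items⟩ := g
        induction items with
        | nil => simp [PySem.Dict.get?] at hg
        | cons p rest ih =>
            rw [PySem.Dict.get?_mk_cons] at hg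
            by_cases hpk : (p.1 == k) = true
            · simp [hpk] at hg
              simp [PySem.Dict.values, hg]
            · simp [hpk] at hg
              have := ih hg
              simp [PySem.Dict.values] at this ⊢
              exact Or.inr this
      exact List.mem_flatten.mpr ⟨v, hv, h⟩

lemma pv_contains_add_ne (v : PySem.Set String) (n x : String) (hxn : x ≠ n) :
    (v.add n).contains x = v.contains x := by
  apply Bool.eq_iff_iff.mpr
  simp [PySem.Set.mem_add, hxn]


lemma pv_unvis_add (univ : List String) (hnd : univ.Nodup) (v : PySem.Set String) (n : String)
    (hmem : n ∈ univ) (hnc : v.contains n = false) :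
    pvUnvis univ (v.add n) + 1 = pvUnvis univ v := by
  induction univ with
  | nil => cases hmem
  | cons a l ih =>
      rw [List.nodup_cons] at hnd
      unfold pvUnvis at *
      rw [List.filter_cons, List.filter_cons]
      by_cases han : a = n
      · subst han
        have h1 : (v.add a).contains a = true := by
          rw [PySem.Set.contains_iff]; exact (PySem.Set.mem_add v a a).mpr (Or.inr rfl)
        have h2 : (l.filter (fun m => !(v.add a).contains m)) = l.filter (fun m => !v.contains m) := by
          apply List.filter_congr
          intro x hx
          have hxa : x ≠ a := fun he => hnd.1 (he ▸ hx)
          rw [pv_contains_add_ne v a x hxa]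
        rw [h2]
        simp only [h1, hnc, Bool.not_true, Bool.not_false, if_true]
        simp
      · have hca := pv_contains_add_ne v n a han
        rw [hca]
        have hn : n ∈ l := by cases hmem with
          | head => exact absurd rfl han
          | tail _ h => exact h
        have ih' := ih hnd.2 hn
        rcases hac : v.contains a with _ | _
        · simp only [Bool.not_false, if_true, List.length_cons] at ih' ⊢
          omega
        · simp only [Bool.not_true, Bool.false_eq_true, if_false] at ih' ⊢
          omega

lemma pv_foldIns_measure (univ : List String) (hnd : univ.Nodup) :
    ∀ (ns : List String) (v : PySem.Set String) (acc : List String),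
      (∀ n ∈ ns, n ∈ univ) →
      (ns.foldl pvBfsIns (v, acc)).2.length + pvUnvis univ (ns.foldl pvBfsIns (v, acc)).1
        ≤ acc.length + pvUnvis univ v := by
  intro ns
  induction ns with
  | nil => intro v acc _; simp
  | cons n ns ih =>
      intro v acc hmem
      rw [List.foldl_cons]
      rcases hc : v.contains n with _ | _
      · have hnv : n ∉ v := by
          intro h; rw [← PySem.Set.contains_iff, hc] at h; cases h
        have hstep : pvBfsIns (v, acc) n = (v.add n, acc ++ [n]) := by
          simp [pvBfsIns, hnv]
        rw [hstep]
        have h1 := ih (v.add n) (acc ++ [n]) (fun m hm => hmem m (List.mem_cons_of_mem _ hm))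
        have h2 := pv_unvis_add univ hnd v n (hmem n (List.mem_cons_self)) hc
        simp only [List.length_append, List.length_cons, List.length_nil] at h1 ⊢
        omega
      · have hyv : n ∈ v := by rw [← PySem.Set.contains_iff, hc]
        have hstep : pvBfsIns (v, acc) n = (v, acc) := by simp [pvBfsIns, hyv]
        rw [hstep]
        exact ih v acc (fun m hm => hmem m (List.mem_cons_of_mem _ hm))

-- the BFS while-loop of A (team accumulates dequeued players; returns (team, visited))
def pvBfs (graph : PySem.Dict String (List String)) (queue : List String)
    (visited : PySem.Set String) (team : List String) : List String × PySem.Set String :=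
  match queue with
  | [] => (team, visited)
  | player :: rest =>
      let s := (graph.getD player []).foldl pvBfsIns (visited, [])
      pvBfs graph (rest ++ s.2) s.1 (team ++ [player])
termination_by pvUnvis (PySem.List.dedup graph.values.flatten) visited + queue.length
decreasing_by
  have hnd : (PySem.List.dedup graph.values.flatten).Nodup := PySem.List.nodup_dedup _
  have hmem : ∀ n ∈ graph.getD player [], n ∈ PySem.List.dedup graph.values.flatten := by
    intro n hn
    exact (PySem.List.mem_dedup _ _).mpr (pv_mem_getD_values graph player n hn)
  have h := pv_foldIns_measure (PySem.List.dedup graph.values.flatten) hnd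
    (graph.getD player []) visited [] hmem
  simp only [List.length_nil, Nat.zero_add, List.length_append, List.length_cons] at h ⊢
  omega

-- body of "for name in names: if name not in visited: …"
def pvStepA (graph : PySem.Dict String (List String)) (nti : PySem.Dict String Int)
    (scores : List Int) (K : Int) (st : PySem.Set String × List (List Int)) (name : String) :
    PySem.Set String × List (List Int) :=
  if st.1.contains name then st
  else
    let r := pvBfs graph [name] (st.1.add name) []
    let team_score := r.1.map (fun player => PySem.List.pyGetD scores (nti.getD player (-1)) 0)
    (r.2, st.2 ++ [PySem.List.slice (PySem.List.sorted team_score (fun x => x) true) none (some K)])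

def get_top_k_brute_force (K : Int) (names : List String) (connections : List (String × String)) (scores : List Int) : List (List Int) :=
  (names.foldl (pvStepA (pvGraph connections) (pvNameToIndex names) scores K)
    (PySem.Set.empty, [])).2

-- ===== PORT B =====
-- idx = {name: i for i, name in enumerate(names)}
def pvIdx (names : List String) : PySem.Dict String Int :=
  (PySem.List.enumerate names 0).foldl (fun d p => d.insert p.2 p.1) PySem.Dict.empty

-- ru, rv = comp[u], comp[v]; if ru != rv: relabel every ru to rv
def pvMergeStep (c : PySem.Dict String String) (e : String × String) : PySem.Dict String String :=
  let ru := c.getD e.1 ""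
  let rv := c.getD e.2 ""
  if ru ≠ rv then PySem.Dict.mk (c.items.map (fun p => if p.2 == ru then (p.1, rv) else p))
  else c

-- comp = {name: name for name in idx}, then one merge pass over connections
def pvComp (names : List String) (connections : List (String × String)) :
    PySem.Dict String String :=
  connections.foldl pvMergeStep
    ((pvIdx names).keys.foldl (fun (d : PySem.Dict String String) n => d.insert n n)
      PySem.Dict.empty)

-- body of "for name in names: r = comp[name]; if r not in emitted: …"
def pvStepB (comp : PySem.Dict String String) (idx : PySem.Dict String Int)
    (scores : List Int) (K : Int) (st : PySem.Set String × List (List Int)) (name : String) :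
    PySem.Set String × List (List Int) :=
  let r := comp.getD name ""
  if st.1.contains r then st
  else
    let team_scores := (comp.items.filter (fun p => p.2 == r)).map
      (fun p => PySem.List.pyGetD scores (idx.getD p.1 (-1)) 0)
    (st.1.add r, st.2 ++ [PySem.List.slice (PySem.List.sorted team_scores (fun x => x) true) none (some K)])

def get_top_k_brute_force_alt (K : Int) (names : List String) (connections : List (String × String)) (scores : List Int) : List (List Int) :=
  (names.foldl (pvStepB (pvComp names connections) (pvIdx names) scores K)
    (PySem.Set.empty, [])).2

-- ===== PRECONDITION & SPEC =====
-- Pre_ excludes inputs where some connection endpoint is missing from names (A raises KeyError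
-- whenever such a node is reachable from a name, and B's union-find raises KeyError on any such
-- edge; where such an edge is isolated from names A returns and B raises, see claim cites) and
-- inputs with fewer scores than names (A and B raise IndexError on the scores lookup).
def Pre_get_top_k_brute_force (K : Int) (names : List String) (connections : List (String × String)) (scores : List Int) : Prop :=
  (∀ c ∈ connections, c.1 ∈ names ∧ c.2 ∈ names) ∧ names.length ≤ scores.length
instance (K : Int) (names : List String) (connections : List (String × String)) (scores : List Int) : Decidable (Pre_get_top_k_brute_force K names connections scores) := by unfold Pre_get_top_k_brute_force; infer_instance

def pvWitness_get_top_k_brute_force : Int × List String × (List (String × String)) × List Int :=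
  (2, ["a", "b", "c"], [("a", "b")], [3, 1, 2])

def Spec_get_top_k_brute_force (K : Int) (names : List String) (connections : List (String × String)) (scores : List Int) (out : List (List Int)) : Prop := out = get_top_k_brute_force_alt K names connections scores
instance (K : Int) (names : List String) (connections : List (String × String)) (scores : List Int) (out : List (List Int)) : Decidable (Spec_get_top_k_brute_force K names connections scores out) := by unfold Spec_get_top_k_brute_force; infer_instance

-- ===== CLAIM (what is proved, stated in full; the proofs are below) =====
def Claim_equal_get_top_k_brute_force : Prop := ∀ (K : Int) (names : List String) (connections : List (String × String)) (scores : List Int), Dom_get_top_k_brute_force K names connections scores → Pre_get_top_k_brute_force K names connections scores → Spec_get_top_k_brute_force K names connections scores (get_top_k_brute_force K names connections scores)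

-- ===== LEMMAS AND PROOFS =====

-- the undirected edge relation of the connection list, and its connectivity closure
def pvAdj (cs : List (String × String)) (x y : String) : Prop :=
  (x, y) ∈ cs ∨ (y, x) ∈ cs

def pvConn (cs : List (String × String)) : String → String → Prop :=
  Relation.ReflTransGen (pvAdj cs)

lemma pvAdj_symm {cs : List (String × String)} {x y : String} (h : pvAdj cs x y) : pvAdj cs y x := h.symm

lemma pvConn_symm {cs : List (String × String)} {x y : String} (h : pvConn cs x y) :
    pvConn cs y x := by
  induction h with
  | refl => exact Relation.ReflTransGen.refl
  | tail _ hstep ih => exact Relation.ReflTransGen.head (pvAdj_symm hstep) ih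

lemma pvConn_mem_names {names : List String} {cs : List (String × String)}
    (hcs : ∀ c ∈ cs, c.1 ∈ names ∧ c.2 ∈ names) {x y : String} (hx : x ∈ names)
    (h : pvConn cs x y) : y ∈ names := by
  induction h with
  | refl => exact hx
  | tail _ hstep ih =>
      rcases hstep with h1 | h2
      · exact (hcs _ h1).2
      · exact (hcs _ h2).1

lemma pvConn_not_closed {cs : List (String × String)} {V : String → Prop}
    (hV : ∀ a, V a → ∀ b, pvAdj cs a b → V b) {s x : String} (hs : ¬ V s)
    (h : pvConn cs s x) : ¬ V x := by
  intro hx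
  have : ∀ a b, pvConn cs a b → V a → V b := by
    intro a b hab
    induction hab with
    | refl => exact id
    | tail _ hstep ih => exact fun ha => hV _ (ih ha) _ hstep
  exact hs (this _ _ (pvConn_symm h) hx)

-- ==== BFS side ====

lemma pv_foldIns_spec (ns : List String) :
    ∀ (v : PySem.Set String) (acc : List String),
      (∀ x ∈ acc, x ∈ v) → acc.Nodup →
      (∀ x, x ∈ (ns.foldl pvBfsIns (v, acc)).1 ↔ x ∈ v ∨ x ∈ ns) ∧
      (∀ x, x ∈ (ns.foldl pvBfsIns (v, acc)).2 ↔ x ∈ acc ∨ (x ∈ ns ∧ x ∉ v)) ∧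
      (ns.foldl pvBfsIns (v, acc)).2.Nodup ∧
      (∀ x ∈ (ns.foldl pvBfsIns (v, acc)).2, x ∈ (ns.foldl pvBfsIns (v, acc)).1) := by
  induction ns with
  | nil =>
      intro v acc hav hnd
      refine ⟨by simp, by simp, hnd, by simpa using hav⟩
  | cons n ns ih =>
      intro v acc hav hnd
      rw [List.foldl_cons]
      rcases hc : v.contains n with _ | _
      · have hnv : n ∉ v := by
          intro h; rw [← PySem.Set.contains_iff, hc] at h; cases h
        have hstep : pvBfsIns (v, acc) n = (v.add n, acc ++ [n]) := by
          simp [pvBfsIns, hnv]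
        rw [hstep]
        have hsub : ∀ x ∈ acc ++ [n], x ∈ v.add n := by
          intro x hx
          rcases List.mem_append.mp hx with h | h
          · exact (PySem.Set.mem_add v n x).mpr (Or.inl (hav x h))
          · simp at h; exact (PySem.Set.mem_add v n x).mpr (Or.inr h)
        have hna : n ∉ acc := fun h => hnv (hav n h)
        have hnd2 : (acc ++ [n]).Nodup := by
          rw [List.nodup_append]
          refine ⟨hnd, List.nodup_singleton n, ?_⟩
          simp
          exact fun a ha he => hna (he ▸ ha)
        obtain ⟨i1, i2, i3, i4⟩ := ih (v.add n) (acc ++ [n]) hsub hnd2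
        refine ⟨?_, ?_, i3, i4⟩
        · intro x
          rw [i1 x, PySem.Set.mem_add]
          by_cases hx : x = n
          · subst hx; simp
          · simp only [hx, or_false, List.mem_cons]
            tauto
        · intro x
          rw [i2 x, List.mem_append]
          by_cases hx : x = n
          · subst hx; simp [hnv]
          · have hxv : x ∈ v.add n ↔ x ∈ v := by
              rw [PySem.Set.mem_add]; simp [hx]
            simp [hx, hxv]
      · have hyv : n ∈ v := by rw [← PySem.Set.contains_iff, hc]
        have hstep : pvBfsIns (v, acc) n = (v, acc) := by simp [pvBfsIns, hyv]
        rw [hstep]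
        obtain ⟨i1, i2, i3, i4⟩ := ih v acc hav hnd
        refine ⟨?_, ?_, i3, i4⟩
        · intro x
          rw [i1 x]
          by_cases hx : x = n
          · subst hx; simp [hyv]
          · simp [hx]
        · intro x
          rw [i2 x]
          by_cases hx : x = n
          · subst hx; simp [hyv]
          · simp [hx]
lemma pvBfs_spec (graph : PySem.Dict String (List String)) (cs : List (String × String))
    (hgraph : ∀ x y, y ∈ graph.getD x [] ↔ pvAdj cs x y) (V : String → Prop)
    (hVc : ∀ a, V a → ∀ b, pvAdj cs a b → V b) (s0 : String) :
    ∀ (queue : List String) (visited : PySem.Set String) (team : List String),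
      queue.Nodup → team.Nodup → (∀ x ∈ team, x ∉ queue) →
      (∀ x, x ∈ visited ↔ V x ∨ x ∈ team ∨ x ∈ queue) →
      (∀ x ∈ team, ¬ V x) → (∀ x ∈ queue, ¬ V x) →
      (∀ x ∈ team, ∀ y, pvAdj cs x y → y ∈ visited) →
      (∀ x ∈ visited, V x ∨ pvConn cs s0 x) →
      (pvBfs graph queue visited team).1.Nodup ∧
      (∀ x, x ∈ (pvBfs graph queue visited team).2 ↔ V x ∨ x ∈ (pvBfs graph queue visited team).1) ∧
      (∀ x ∈ (pvBfs graph queue visited team).1, ¬ V x) ∧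
      (∀ x ∈ (pvBfs graph queue visited team).2, ∀ y, pvAdj cs x y → y ∈ (pvBfs graph queue visited team).2) ∧
      (∀ x ∈ (pvBfs graph queue visited team).2, V x ∨ pvConn cs s0 x) ∧
      (∀ x ∈ visited, x ∈ (pvBfs graph queue visited team).2) := by
  intro queue visited team
  induction queue, visited, team using pvBfs.induct graph with
  | case1 visited team =>
      intro _ htn _ hvis hVt _ hproc hsound
      rw [pvBfs]
      refine ⟨htn, ?_, hVt, ?_, hsound, fun x h => h⟩
      · intro x
        rw [hvis x]
        simp
      · intro x hx y hadj
        rcases (hvis x).mp hx with h | h | h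
        · exact (hvis y).mpr (Or.inl (hVc x h y hadj))
        · exact hproc x h y hadj
        · cases h
  | case2 visited team player rest s IH =>
      intro hqn htn htq hvis hVt hVq hproc hsound
      rw [pvBfs]
      obtain ⟨f1, f2, f3, f4⟩ :=
        pv_foldIns_spec (graph.getD player []) visited [] (by simp) List.nodup_nil
      simp only [List.mem_nil_iff, false_or] at f2
      have hpv : player ∈ visited := (hvis player).mpr (Or.inr (Or.inr List.mem_cons_self))
      have hrestv : ∀ x ∈ rest, x ∈ visited :=
        fun x hx => (hvis x).mpr (Or.inr (Or.inr (List.mem_cons_of_mem _ hx)))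
      have hteamv : ∀ x ∈ team, x ∈ visited := fun x hx => (hvis x).mpr (Or.inr (Or.inl hx))
      have hVvis : ∀ x, V x → x ∈ visited := fun x hx => (hvis x).mpr (Or.inl hx)
      have hseq : s = List.foldl pvBfsIns (visited, []) (graph.getD player []) := rfl
      rw [← hseq] at f1 f2 f3 f4
      have hs2nv : ∀ x ∈ s.2, x ∉ visited := fun x hx => ((f2 x).mp hx).2
      have hpr : player ∉ rest := (List.nodup_cons.mp hqn).1
      have h1 : (rest ++ s.2).Nodup := by
        rw [List.nodup_append]
        refine ⟨(List.nodup_cons.mp hqn).2, f3, ?_⟩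
        intro x hx y hy heq
        subst heq
        exact hs2nv x hy (hrestv x hx)
      have h2 : (team ++ [player]).Nodup := by
        rw [List.nodup_append]
        refine ⟨htn, List.nodup_singleton _, ?_⟩
        intro x hx y hy heq
        rw [List.mem_singleton] at hy
        subst hy; subst heq
        exact htq x hx List.mem_cons_self
      have h3 : ∀ x ∈ team ++ [player], x ∉ rest ++ s.2 := by
        intro x hx
        rw [List.mem_append] at hx
        rw [List.mem_append]
        rintro (hr | hs2)
        · rcases hx with hx | hx
          · exact htq x hx (List.mem_cons_of_mem _ hr)
          · rw [List.mem_singleton] at hx; subst hx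
            exact hpr hr
        · rcases hx with hx | hx
          · exact hs2nv x hs2 (hteamv x hx)
          · rw [List.mem_singleton] at hx; subst hx
            exact hs2nv _ hs2 hpv
      have h4 : ∀ x, x ∈ s.1 ↔ V x ∨ x ∈ team ++ [player] ∨ x ∈ rest ++ s.2 := by
        intro x
        rw [f1 x]
        by_cases hxv : x ∈ visited
        · simp only [hxv, true_or, true_iff]
          rcases (hvis x).mp hxv with h | h | h
          · exact Or.inl h
          · exact Or.inr (Or.inl (List.mem_append.mpr (Or.inl h)))
          · rcases List.mem_cons.mp h with h | h
            · subst h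
              exact Or.inr (Or.inl (List.mem_append.mpr (Or.inr (List.mem_singleton.mpr rfl))))
            · exact Or.inr (Or.inr (List.mem_append.mpr (Or.inl h)))
        · simp only [hxv, false_or]
          constructor
          · intro hn
            exact Or.inr (Or.inr (List.mem_append.mpr (Or.inr ((f2 x).mpr ⟨hn, hxv⟩))))
          · rintro (h | h | h)
            · exact absurd (hVvis x h) hxv
            · rcases List.mem_append.mp h with h | h
              · exact absurd (hteamv x h) hxv
              · rw [List.mem_singleton] at h; subst h; exact absurd hpv hxv
            · rcases List.mem_append.mp h with h | h
              · exact absurd (hrestv x h) hxv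
              · exact ((f2 x).mp h).1
      have h5 : ∀ x ∈ team ++ [player], ¬ V x := by
        intro x hx
        rcases List.mem_append.mp hx with h | h
        · exact hVt x h
        · rw [List.mem_singleton] at h; subst h
          exact hVq x List.mem_cons_self
      have h6 : ∀ x ∈ rest ++ s.2, ¬ V x := by
        intro x hx
        rcases List.mem_append.mp hx with h | h
        · exact hVq x (List.mem_cons_of_mem _ h)
        · intro hv
          exact hs2nv x h (hVvis x hv)
      have h7 : ∀ x ∈ team ++ [player], ∀ y, pvAdj cs x y → y ∈ s.1 := by
        intro x hx y hadj
        rcases List.mem_append.mp hx with h | h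
        · exact (f1 y).mpr (Or.inl (hproc x h y hadj))
        · rw [List.mem_singleton] at h; subst h
          exact (f1 y).mpr (Or.inr ((hgraph x y).mpr hadj))
      have h8 : ∀ x ∈ s.1, V x ∨ pvConn cs s0 x := by
        intro x hx
        rcases (f1 x).mp hx with h | h
        · exact hsound x h
        · have hadj : pvAdj cs player x := (hgraph player x).mp h
          rcases hsound player hpv with hVp | hCp
          · exact absurd hVp (hVq player List.mem_cons_self)
          · exact Or.inr (Relation.ReflTransGen.tail hCp hadj)
      obtain ⟨c1, c2, c3, c4, c5, c6⟩ := IH h1 h2 h3 h4 h5 h6 h7 h8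
      exact ⟨c1, c2, c3, c4, c5, fun x hx => c6 x ((f1 x).mpr (Or.inl hx))⟩

-- ==== union-find side ====

def pvJoin (r : String → String → Prop) (u v : String) (a b : String) : Prop :=
  r a b ∨ (r a u ∧ r v b) ∨ (r a v ∧ r u b)

lemma pvConn_nil {a b : String} : pvConn [] a b ↔ a = b := by
  constructor
  · intro h
    induction h with
    | refl => rfl
    | tail _ hstep _ => rcases hstep with h | h <;> simp at h
  · rintro rfl; exact Relation.ReflTransGen.refl

lemma pvConn_mono {cs cs' : List (String × String)} (hsub : ∀ c ∈ cs, c ∈ cs')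
    {a b : String} (h : pvConn cs a b) : pvConn cs' a b := by
  induction h with
  | refl => exact Relation.ReflTransGen.refl
  | tail _ hstep ih =>
      refine Relation.ReflTransGen.tail ih ?_
      rcases hstep with h | h
      · exact Or.inl (hsub _ h)
      · exact Or.inr (hsub _ h)

lemma pvConn_append_edge (cs : List (String × String)) (u v a b : String) :
    pvConn (cs ++ [(u, v)]) a b ↔ pvJoin (pvConn cs) u v a b := by
  constructor
  · intro h
    induction h with
    | refl => exact Or.inl Relation.ReflTransGen.refl
    | @tail x y _ hstep ih =>
        have hcase : pvAdj cs x y ∨ (x = u ∧ y = v) ∨ (x = v ∧ y = u) := by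
          rcases hstep with h1 | h1 <;> rw [List.mem_append] at h1
          · rcases h1 with h1 | h1
            · exact Or.inl (Or.inl h1)
            · rw [List.mem_singleton, Prod.mk.injEq] at h1
              exact Or.inr (Or.inl h1)
          · rcases h1 with h1 | h1
            · exact Or.inl (Or.inr h1)
            · rw [List.mem_singleton, Prod.mk.injEq] at h1
              exact Or.inr (Or.inr ⟨h1.2, h1.1⟩)
        rcases hcase with hxy | ⟨rfl, rfl⟩ | ⟨rfl, rfl⟩
        · rcases ih with hr | ⟨h1, h2⟩ | ⟨h1, h2⟩
          · exact Or.inl (hr.trans (Relation.ReflTransGen.single hxy))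
          · exact Or.inr (Or.inl ⟨h1, h2.trans (Relation.ReflTransGen.single hxy)⟩)
          · exact Or.inr (Or.inr ⟨h1, h2.trans (Relation.ReflTransGen.single hxy)⟩)
        · rcases ih with hr | ⟨h1, h2⟩ | ⟨h1, h2⟩
          · exact Or.inr (Or.inl ⟨hr, Relation.ReflTransGen.refl⟩)
          · exact Or.inr (Or.inl ⟨h1, Relation.ReflTransGen.refl⟩)
          · exact Or.inl h1
        · rcases ih with hr | ⟨h1, h2⟩ | ⟨h1, h2⟩
          · exact Or.inr (Or.inr ⟨hr, Relation.ReflTransGen.refl⟩)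
          · exact Or.inl h1
          · exact Or.inr (Or.inr ⟨h1, Relation.ReflTransGen.refl⟩)
  · have hsub : ∀ c ∈ cs, c ∈ cs ++ [(u, v)] := fun c hc => List.mem_append.mpr (Or.inl hc)
    have hedge : pvConn (cs ++ [(u, v)]) u v :=
      Relation.ReflTransGen.single (Or.inl (List.mem_append.mpr (Or.inr (List.mem_singleton.mpr rfl))))
    have hedge' : pvConn (cs ++ [(u, v)]) v u :=
      Relation.ReflTransGen.single (Or.inr (List.mem_append.mpr (Or.inr (List.mem_singleton.mpr rfl))))
    rintro (h | ⟨h1, h2⟩ | ⟨h1, h2⟩)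
    · exact pvConn_mono hsub h
    · exact ((pvConn_mono hsub h1).trans hedge).trans (pvConn_mono hsub h2)
    · exact ((pvConn_mono hsub h1).trans hedge').trans (pvConn_mono hsub h2)

lemma pvJoin_congr {r r' : String → String → Prop} (h : ∀ x y, r x y ↔ r' x y)
    (u v a b : String) : pvJoin r u v a b ↔ pvJoin r' u v a b := by
  unfold pvJoin
  rw [h, h, h, h, h]

lemma pvFoldJoin_conn (cs : List (String × String)) :
    ∀ a b, (cs.foldl (fun r e => pvJoin r e.1 e.2) (Eq : String → String → Prop)) a b ↔
      pvConn cs a b := by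
  induction cs using List.reverseRecOn with
  | nil =>
      intro a b
      rw [List.foldl_nil]
      exact pvConn_nil.symm
  | append_singleton l e ih =>
      intro a b
      rw [List.foldl_append, List.foldl_cons, List.foldl_nil]
      obtain ⟨u, v⟩ := e
      rw [pvJoin_congr ih u v a b]
      exact (pvConn_append_edge l u v a b).symm

lemma pvJoin_symm {r : String → String → Prop} (hs : ∀ x y, r x y → r y x)
    {u v a b : String} (h : pvJoin r u v a b) : pvJoin r u v b a := by
  rcases h with h | ⟨h1, h2⟩ | ⟨h1, h2⟩
  · exact Or.inl (hs _ _ h)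
  · exact Or.inr (Or.inr ⟨hs _ _ h2, hs _ _ h1⟩)
  · exact Or.inr (Or.inl ⟨hs _ _ h2, hs _ _ h1⟩)

lemma pvJoin_trans {r : String → String → Prop} (hs : ∀ x y, r x y → r y x)
    (ht : ∀ x y z, r x y → r y z → r x z) {u v a b c : String}
    (h1 : pvJoin r u v a b) (h2 : pvJoin r u v b c) : pvJoin r u v a c := by
  rcases h1 with h1 | ⟨g1, g2⟩ | ⟨g1, g2⟩ <;> rcases h2 with h2 | ⟨k1, k2⟩ | ⟨k1, k2⟩
  · exact Or.inl (ht _ _ _ h1 h2)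
  · exact Or.inr (Or.inl ⟨ht _ _ _ h1 k1, k2⟩)
  · exact Or.inr (Or.inr ⟨ht _ _ _ h1 k1, k2⟩)
  · exact Or.inr (Or.inl ⟨g1, ht _ _ _ g2 h2⟩)
  · exact Or.inl (ht _ _ _ g1 (ht _ _ _ (hs _ _ (ht _ _ _ g2 k1)) k2))
  · exact Or.inl (ht _ _ _ g1 k2)
  · exact Or.inr (Or.inr ⟨g1, ht _ _ _ g2 h2⟩)
  · exact Or.inl (ht _ _ _ g1 k2)
  · exact Or.inl (ht _ _ _ g1 (ht _ _ _ (hs _ _ (ht _ _ _ g2 k1)) k2))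

lemma pvRelabel_keys (c : PySem.Dict String String) (ru rv : String) :
    (PySem.Dict.mk (c.items.map (fun p => if p.2 == ru then (p.1, rv) else p))).keys = c.keys := by
  rw [PySem.Dict.keys_mk, List.map_map]
  have : ((fun (x : String × String) => x.1) ∘ fun p => if p.2 == ru then (p.1, rv) else p) =
      fun (x : String × String) => x.1 := by
    funext p
    simp only [Function.comp]
    split_ifs <;> rfl
  rw [this]
  rfl

lemma pvRelabel_getD (c : PySem.Dict String String) (hnd : c.keys.Nodup) (a : String)
    (ha : a ∈ c.keys) (ru rv : String) :
    (PySem.Dict.mk (c.items.map (fun p => if p.2 == ru then (p.1, rv) else p))).getD a "" =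
      if c.getD a "" = ru then rv else c.getD a "" := by
  obtain ⟨p, hp, hfst⟩ := List.mem_map.mp ha
  have hw : (a, p.2) ∈ c.items := by rw [← hfst]; exact hp
  have hold : c.getD a "" = p.2 := PySem.Dict.getD_of_mem_items c hw hnd ""
  have hmemnew : (a, if p.2 = ru then rv else p.2) ∈
      (PySem.Dict.mk (c.items.map (fun p => if p.2 == ru then (p.1, rv) else p))).items := by
    refine List.mem_map.mpr ⟨(a, p.2), hw, ?_⟩
    by_cases h : p.2 = ru
    · simp [h]
    · simp [h]
  have hndnew : (PySem.Dict.mk (c.items.map (fun p => if p.2 == ru then (p.1, rv) else p))).keys.Nodup := by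
    rw [pvRelabel_keys]; exact hnd
  rw [PySem.Dict.getD_of_mem_items _ hmemnew hndnew, hold]

lemma pvMerge_invariant (names : List String) :
    ∀ (cs : List (String × String)) (c : PySem.Dict String String) (r : String → String → Prop),
      (∀ x y, r x y → r y x) → (∀ x y z, r x y → r y z → r x z) →
      c.keys = PySem.List.dedup names →
      (∀ e ∈ cs, e.1 ∈ names ∧ e.2 ∈ names) →
      (∀ a b, a ∈ names → b ∈ names → (c.getD a "" = c.getD b "" ↔ r a b)) →
      (cs.foldl pvMergeStep c).keys = PySem.List.dedup names ∧
      (∀ a b, a ∈ names → b ∈ names →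
        ((cs.foldl pvMergeStep c).getD a "" = (cs.foldl pvMergeStep c).getD b "" ↔
          (cs.foldl (fun r' e => pvJoin r' e.1 e.2) r) a b)) := by
  intro cs
  induction cs with
  | nil => intro c r _ _ hkeys _ hiff; exact ⟨hkeys, fun a b ha hb => hiff a b ha hb⟩
  | cons e cs ih =>
      intro c r hs ht hkeys hcs hiff
      rw [List.foldl_cons, List.foldl_cons]
      obtain ⟨u, v⟩ := e
      have hu : u ∈ names := (hcs (u, v) List.mem_cons_self).1
      have hv : v ∈ names := (hcs (u, v) List.mem_cons_self).2
      have hcs' : ∀ e ∈ cs, e.1 ∈ names ∧ e.2 ∈ names :=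
        fun e he => hcs e (List.mem_cons_of_mem _ he)
      have hmemk : ∀ x, x ∈ names → x ∈ c.keys := by
        intro x hx
        rw [hkeys, PySem.List.mem_dedup]
        exact hx
      have hndk : c.keys.Nodup := by rw [hkeys]; exact PySem.List.nodup_dedup _
      by_cases heq : c.getD u "" = c.getD v ""
      · have hstep : pvMergeStep c (u, v) = c := by
          simp [pvMergeStep, heq]
        rw [hstep]
        have huv : r u v := (hiff u v hu hv).mp heq
        apply ih c (pvJoin r u v) (fun x y => pvJoin_symm hs) (fun x y z => pvJoin_trans hs ht)
          hkeys hcs'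
        intro a b ha hb
        rw [hiff a b ha hb]
        constructor
        · exact Or.inl
        · rintro (h | ⟨h1, h2⟩ | ⟨h1, h2⟩)
          · exact h
          · exact ht _ _ _ (ht _ _ _ h1 huv) h2
          · exact ht _ _ _ (ht _ _ _ h1 (hs _ _ huv)) h2
      · have hstep : pvMergeStep c (u, v) =
            PySem.Dict.mk (c.items.map (fun p => if p.2 == c.getD u "" then (p.1, c.getD v "") else p)) := by
          simp [pvMergeStep, heq]
        rw [hstep]
        set ru := c.getD u "" with hru
        set rv := c.getD v "" with hrv
        set c' := PySem.Dict.mk (c.items.map (fun p => if p.2 == ru then (p.1, rv) else p)) with hc'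
        have hkeys' : c'.keys = PySem.List.dedup names := by
          rw [hc', pvRelabel_keys]; exact hkeys
        have hgd : ∀ x, x ∈ names → c'.getD x "" = if c.getD x "" = ru then rv else c.getD x "" := by
          intro x hx
          rw [hc']
          exact pvRelabel_getD c hndk x (hmemk x hx) ru rv
        apply ih c' (pvJoin r u v) (fun x y => pvJoin_symm hs) (fun x y z => pvJoin_trans hs ht)
          hkeys' hcs'
        intro a b ha hb
        rw [hgd a ha, hgd b hb]
        have hau : c.getD a "" = ru ↔ r a u := hiff a u ha hu
        have hav : c.getD a "" = rv ↔ r a v := hiff a v ha hv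
        have hbu : c.getD b "" = ru ↔ r b u := hiff b u hb hu
        have hbv : c.getD b "" = rv ↔ r b v := hiff b v hb hv
        have hab : c.getD a "" = c.getD b "" ↔ r a b := hiff a b ha hb
        have hnuv : ¬ r u v := fun h => heq ((hiff u v hu hv).mpr h)
        split_ifs with h1 h2 h2
        · refine iff_of_true rfl (Or.inl ?_)
          exact ht _ _ _ (hau.mp h1) (hs _ _ (hbu.mp h2))
        · constructor
          · intro hrvb
            exact Or.inr (Or.inl ⟨hau.mp h1, hs _ _ (hbv.mp hrvb.symm)⟩)
          · rintro (h | ⟨k1, k2⟩ | ⟨k1, k2⟩)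
            · exact absurd (hbu.mpr (ht _ _ _ (hs _ _ h) (hau.mp h1))) h2
            · exact (hbv.mpr (hs _ _ k2)).symm
            · exact absurd (ht _ _ _ (hs _ _ (hau.mp h1)) k1) hnuv
        · constructor
          · intro harv
            exact Or.inr (Or.inr ⟨hav.mp harv, hs _ _ (hbu.mp h2)⟩)
          · rintro (h | ⟨k1, k2⟩ | ⟨k1, k2⟩)
            · exact absurd (hau.mpr (ht _ _ _ h (hbu.mp h2))) h1
            · exact absurd (hau.mpr k1) h1
            · exact hav.mpr k1
        · constructor
          · intro h
            exact Or.inl (hab.mp h)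
          · rintro (h | ⟨k1, k2⟩ | ⟨k1, k2⟩)
            · exact hab.mpr h
            · exact absurd (hau.mpr k1) h1
            · exact absurd (hbu.mpr (hs _ _ k2)) h2

lemma pvIdx_keys (names : List String) : (pvIdx names).keys = PySem.List.dedup names := by
  unfold pvIdx
  rw [PySem.Dict.keys_foldl_insert_key (PySem.List.enumerate names 0) (fun p => p.2)
    (fun _ p => p.1) PySem.Dict.empty]
  rw [PySem.Dict.keys_empty, PySem.List.map_snd_enumerate]
  rw [show PySem.Set.update ([] : PySem.Set String) names = PySem.Set.ofList names from
    by rw [PySem.Set.ofList_eq_foldl]; rfl]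
  rw [← PySem.List.dedup_eq_ofList]

lemma pvInsId_getD (l : List String) :
    ∀ (d : PySem.Dict String String) (n : String),
      (n ∈ l → (l.foldl (fun d n => d.insert n n) d).getD n "" = n) ∧
      (n ∉ l → (l.foldl (fun d n => d.insert n n) d).getD n "" = d.getD n "") := by
  induction l with
  | nil => intro d n; exact ⟨fun h => absurd h (List.not_mem_nil), fun _ => rfl⟩
  | cons a l ih =>
      intro d n
      rw [List.foldl_cons]
      constructor
      · intro hn
        rcases List.mem_cons.mp hn with h | h
        · subst h
          by_cases hl : n ∈ l
          · exact (ih _ n).1 hl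
          · rw [(ih _ n).2 hl, PySem.Dict.getD_insert]
            simp
        · exact (ih _ n).1 h
      · intro hn
        have hna : n ≠ a := fun h => hn (h ▸ List.mem_cons_self)
        have hnl : n ∉ l := fun h => hn (List.mem_cons_of_mem _ h)
        rw [(ih _ n).2 hnl, PySem.Dict.getD_insert]
        simp [hna]

lemma pvComp_spec (names : List String) (cs : List (String × String))
    (hcs : ∀ e ∈ cs, e.1 ∈ names ∧ e.2 ∈ names) :
    (pvComp names cs).keys = PySem.List.dedup names ∧
    (∀ a b, a ∈ names → b ∈ names →
      ((pvComp names cs).getD a "" = (pvComp names cs).getD b "" ↔ pvConn cs a b)) := by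
  unfold pvComp
  set c0 := (pvIdx names).keys.foldl (fun (d : PySem.Dict String String) n => d.insert n n)
    PySem.Dict.empty with hc0
  have hkeys0 : c0.keys = PySem.List.dedup names := by
    rw [hc0]
    rw [PySem.Dict.keys_foldl_insert_key ((pvIdx names).keys) (fun n => n)
      (fun _ n => n) PySem.Dict.empty]
    rw [PySem.Dict.keys_empty, show List.map (fun (n : String) => n) (pvIdx names).keys =
      (pvIdx names).keys from List.map_id _, pvIdx_keys]
    rw [show PySem.Set.update ([] : PySem.Set String) (PySem.List.dedup names) =
      PySem.Set.ofList (PySem.List.dedup names) from by rw [PySem.Set.ofList_eq_foldl]; rfl]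
    exact PySem.Set.ofList_eq_self_of_nodup _ (PySem.List.nodup_dedup _)
  have hgd0 : ∀ x ∈ names, c0.getD x "" = x := by
    intro x hx
    rw [hc0]
    exact (pvInsId_getD ((pvIdx names).keys) PySem.Dict.empty x).1
      (by rw [pvIdx_keys, PySem.List.mem_dedup]; exact hx)
  have hiff0 : ∀ a b, a ∈ names → b ∈ names → (c0.getD a "" = c0.getD b "" ↔ a = b) := by
    intro a b ha hb
    rw [hgd0 a ha, hgd0 b hb]
  obtain ⟨hk, hi⟩ := pvMerge_invariant names cs c0 Eq (fun x y h => h.symm)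
    (fun x y z h1 h2 => h1.trans h2) hkeys0 hcs hiff0
  refine ⟨hk, ?_⟩
  intro a b ha hb
  rw [hi a b ha hb]
  exact pvFoldJoin_conn cs a b

-- ==== outer loops ====

lemma pvGraph_getD (cs : List (String × String)) :
    ∀ (d : PySem.Dict String (List String)) (x y : String),
      y ∈ (cs.foldl pvGraphStep d).getD x [] ↔ y ∈ d.getD x [] ∨ pvAdj cs x y := by
  induction cs with
  | nil => intro d x y; simp [pvAdj]
  | cons e cs ih =>
      intro d x y
      rw [List.foldl_cons, ih]
      obtain ⟨u, v⟩ := e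
      have hstep : y ∈ (pvGraphStep d (u, v)).getD x [] ↔
          y ∈ d.getD x [] ∨ (x = u ∧ y = v) ∨ (x = v ∧ y = u) := by
        unfold pvGraphStep
        rw [PySem.Dict.getD_insert]
        by_cases hxv : x = v
        · subst hxv
          rw [if_pos rfl, List.mem_append, List.mem_singleton, PySem.Dict.getD_insert]
          by_cases hxu : x = u
          · subst hxu
            rw [if_pos rfl, List.mem_append, List.mem_singleton]
            tauto
          · rw [if_neg hxu]
            tauto
        · rw [if_neg hxv, PySem.Dict.getD_insert]
          by_cases hxu : x = u
          · subst hxu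
            rw [if_pos rfl, List.mem_append, List.mem_singleton]
            tauto
          · rw [if_neg hxu]
            tauto
      rw [hstep]
      have hadj : pvAdj ((u, v) :: cs) x y ↔
          pvAdj cs x y ∨ (x = u ∧ y = v) ∨ (x = v ∧ y = u) := by
        unfold pvAdj
        simp only [List.mem_cons, Prod.mk.injEq]
        tauto
      rw [hadj]
      tauto

lemma pvGraph_mem (cs : List (String × String)) (x y : String) :
    y ∈ (pvGraph cs).getD x [] ↔ pvAdj cs x y := by
  unfold pvGraph
  rw [pvGraph_getD]
  simp [PySem.Dict.getD_empty]

lemma pv_sorted_rev_perm (xs ys : List Int) (h : xs.Perm ys) :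
    PySem.List.sorted xs (fun x => x) true = PySem.List.sorted ys (fun x => x) true := by
  apply PySem.List.eq_of_perm_of_pairwise_le_of_injective (fun x : Int => -x) neg_injective
  · exact ((PySem.List.sorted_perm xs _ true).trans h).trans
      (PySem.List.sorted_perm ys _ true).symm
  · exact (PySem.List.sorted_pairwise_rev xs (fun x => x)).imp (fun h => by omega)
  · exact (PySem.List.sorted_pairwise_rev ys (fun x => x)).imp (fun h => by omega)

lemma pv_keys_eq_map_fst (d : PySem.Dict String String) : d.keys = d.items.map (fun p => p.1) := rfl

lemma pv_outer (K : Int) (names : List String) (cs : List (String × String)) (scores : List Int)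
    (hcs : ∀ c ∈ cs, c.1 ∈ names ∧ c.2 ∈ names) :
    ∀ (todo done : List String), (∀ x ∈ todo, x ∈ names) → (∀ x ∈ done, x ∈ names) →
      ∀ (vA emB : PySem.Set String) (res : List (List Int)),
        (∀ x, x ∈ vA ↔ ∃ m ∈ done, pvConn cs m x) →
        (∀ l, l ∈ emB ↔ ∃ m ∈ done, (pvComp names cs).getD m "" = l) →
        (todo.foldl (pvStepA (pvGraph cs) (pvNameToIndex names) scores K) (vA, res)).2 =
        (todo.foldl (pvStepB (pvComp names cs) (pvIdx names) scores K) (emB, res)).2 := by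
  obtain ⟨hck, hciff⟩ := pvComp_spec names cs hcs
  have hndk : (pvComp names cs).keys.Nodup := by rw [hck]; exact PySem.List.nodup_dedup _
  intro todo
  induction todo with
  | nil => intro done _ _ vA emB res _ _; rfl
  | cons name todo ih =>
      intro done htodo hdone vA emB res hv he
      have hname : name ∈ names := htodo name List.mem_cons_self
      have htodo' : ∀ x ∈ todo, x ∈ names := fun x hx => htodo x (List.mem_cons_of_mem _ hx)
      rw [List.foldl_cons, List.foldl_cons]
      have hcondB : ((pvComp names cs).getD name "" ∈ emB) ↔ ∃ m ∈ done, pvConn cs m name := by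
        rw [he]
        constructor
        · rintro ⟨m, hm, hgd⟩
          exact ⟨m, hm, (hciff m name (hdone m hm) hname).mp hgd⟩
        · rintro ⟨m, hm, hconn⟩
          exact ⟨m, hm, (hciff m name (hdone m hm) hname).mpr hconn⟩
      by_cases hP : ∃ m ∈ done, pvConn cs m name
      · -- both sides skip
        have hcA : vA.contains name = true := by
          rw [PySem.Set.contains_iff, hv]; exact hP
        have hcB : emB.contains ((pvComp names cs).getD name "") = true := by
          rw [PySem.Set.contains_iff, hcondB]; exact hP
        have hsA : pvStepA (pvGraph cs) (pvNameToIndex names) scores K (vA, res) name = (vA, res) := by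
          unfold pvStepA
          rw [if_pos hcA]
        have hsB : pvStepB (pvComp names cs) (pvIdx names) scores K (emB, res) name = (emB, res) := by
          unfold pvStepB
          rw [if_pos hcB]
        rw [hsA, hsB]
        exact ih done htodo' hdone vA emB res hv he
      · -- both sides emit
        have hcA : vA.contains name = false := by
          rw [← Bool.not_eq_true, PySem.Set.contains_iff, hv]; exact hP
        have hcB : emB.contains ((pvComp names cs).getD name "") = false := by
          rw [← Bool.not_eq_true, PySem.Set.contains_iff, hcondB]; exact hP
        -- BFS characterization
        have hVc : ∀ a, (∃ m ∈ done, pvConn cs m a) → ∀ b, pvAdj cs a b →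
            (∃ m ∈ done, pvConn cs m b) := by
          rintro a ⟨m, hm, hconn⟩ b hadj
          exact ⟨m, hm, hconn.tail hadj⟩
        obtain ⟨c1, c2, c3, c4, c5, c6⟩ :=
          pvBfs_spec (pvGraph cs) cs (pvGraph_mem cs) (fun x => ∃ m ∈ done, pvConn cs m x) hVc
            name [name] (vA.add name) []
            (List.nodup_singleton _) List.nodup_nil (by intro x h; cases h)
            (by
              intro x
              rw [PySem.Set.mem_add, List.mem_singleton, hv]
              simp only [List.mem_nil_iff, false_or])
            (by intro x h; cases h)
            (by
              intro x hx
              rw [List.mem_singleton] at hx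
              subst hx
              exact hP)
            (by intro x h; cases h)
            (by
              intro x hx
              rcases (PySem.Set.mem_add vA name x).mp hx with h | h
              · exact Or.inl ((hv x).mp h)
              · subst h; exact Or.inr Relation.ReflTransGen.refl)
        set r := pvBfs (pvGraph cs) [name] (vA.add name) [] with hr
        have hnamer2 : name ∈ r.2 :=
          c6 name ((PySem.Set.mem_add vA name name).mpr (Or.inr rfl))
        have hteam : ∀ x, x ∈ r.1 ↔ pvConn cs name x := by
          intro x
          constructor
          · intro hx
            rcases c5 x ((c2 x).mpr (Or.inr hx)) with h | h
            · exact absurd h (c3 x hx)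
            · exact h
          · intro hconn
            have hx2 : x ∈ r.2 := by
              induction hconn with
              | refl => exact hnamer2
              | tail _ hstep ihh => exact c4 _ ihh _ hstep
            have hnV : ¬ (∃ m ∈ done, pvConn cs m x) := pvConn_not_closed hVc hP hconn
            rcases (c2 x).mp hx2 with h | h
            · exact absurd h hnV
            · exact h
        -- B-side component list
        set R := (pvComp names cs).getD name "" with hR
        set filtered := (pvComp names cs).items.filter (fun p => p.2 == R) with hfil
        have hBlist : ∀ x, x ∈ filtered.map (fun p => p.1) ↔ pvConn cs name x := by
          intro x
          constructor
          · intro hx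
            obtain ⟨p, hpf, hpx⟩ := List.mem_map.mp hx
            obtain ⟨hpi, hpR⟩ := List.mem_filter.mp hpf
            have hpR' : p.2 = R := by rwa [beq_iff_eq] at hpR
            have hkx : p.1 ∈ (pvComp names cs).keys := by
              rw [pv_keys_eq_map_fst]
              exact List.mem_map.mpr ⟨p, hpi, rfl⟩
            have hxnames : p.1 ∈ names := by
              rw [hck, PySem.List.mem_dedup] at hkx
              exact hkx
            have hgd : (pvComp names cs).getD p.1 "" = p.2 := by
              have := PySem.Dict.getD_of_mem_items (pvComp names cs)
                (show (p.1, p.2) ∈ (pvComp names cs).items from hpi) hndk ""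
              exact this
            have : (pvComp names cs).getD name "" = (pvComp names cs).getD p.1 "" := by
              rw [hgd, hpR', hR]
            subst hpx
            exact (hciff name p.1 hname hxnames).mp this
          · intro hconn
            have hxnames : x ∈ names := pvConn_mem_names hcs hname hconn
            have hkx : x ∈ (pvComp names cs).keys := by
              rw [hck, PySem.List.mem_dedup]
              exact hxnames
            rw [pv_keys_eq_map_fst] at hkx
            obtain ⟨p, hpi, hpx⟩ := List.mem_map.mp hkx
            have hgd : (pvComp names cs).getD p.1 "" = p.2 := by
              exact PySem.Dict.getD_of_mem_items (pvComp names cs)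
                (show (p.1, p.2) ∈ (pvComp names cs).items from hpi) hndk ""
            have hre : p.2 = R := by
              rw [← hgd, hpx, hR]
              exact ((hciff name x hname hxnames).mpr hconn).symm
            refine List.mem_map.mpr ⟨p, List.mem_filter.mpr ⟨hpi, by rw [beq_iff_eq]; exact hre⟩, hpx⟩
        have hBnodup : (filtered.map (fun p => p.1)).Nodup := by
          have hsub : (filtered.map (fun p => p.1)).Sublist ((pvComp names cs).items.map (fun p => p.1)) := by
            rw [hfil]
            exact List.Sublist.map _ (List.filter_sublist (l := (pvComp names cs).items))
          rw [← pv_keys_eq_map_fst] at hsub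
          exact hndk.sublist hsub
        have hperm : r.1.Perm (filtered.map (fun p => p.1)) :=
          (List.perm_ext_iff_of_nodup c1 hBnodup).mpr
            (fun x => (hteam x).trans (hBlist x).symm)
        -- score lists are equal after sorting
        have hidx : pvIdx names = pvNameToIndex names := rfl
        have hmapB : filtered.map
            (fun p => PySem.List.pyGetD scores ((pvIdx names).getD p.1 (-1)) 0) =
            (filtered.map (fun p => p.1)).map
              (fun player => PySem.List.pyGetD scores ((pvNameToIndex names).getD player (-1)) 0) := by
          rw [List.map_map, hidx]
          rfl
        have hsorteq :
            PySem.List.sorted (r.1.map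
              (fun player => PySem.List.pyGetD scores ((pvNameToIndex names).getD player (-1)) 0))
              (fun x => x) true =
            PySem.List.sorted (filtered.map
              (fun p => PySem.List.pyGetD scores ((pvIdx names).getD p.1 (-1)) 0))
              (fun x => x) true := by
          rw [hmapB]
          exact pv_sorted_rev_perm _ _ (hperm.map _)
        -- unfold one step of each loop
        have hsA : pvStepA (pvGraph cs) (pvNameToIndex names) scores K (vA, res) name =
            (r.2, res ++ [PySem.List.slice (PySem.List.sorted (r.1.map
              (fun player => PySem.List.pyGetD scores ((pvNameToIndex names).getD player (-1)) 0))
              (fun x => x) true) none (some K)]) := by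
          unfold pvStepA
          rw [if_neg (by rw [hcA]; exact Bool.false_ne_true)]
        have hsB : pvStepB (pvComp names cs) (pvIdx names) scores K (emB, res) name =
            (emB.add R, res ++ [PySem.List.slice (PySem.List.sorted (filtered.map
              (fun p => PySem.List.pyGetD scores ((pvIdx names).getD p.1 (-1)) 0))
              (fun x => x) true) none (some K)]) := by
          unfold pvStepB
          rw [if_neg (by rw [← hR, hcB]; exact Bool.false_ne_true)]
        rw [hsA, hsB, ← hsorteq]
        -- apply the induction hypothesis with done ++ [name]
        apply ih (done ++ [name]) htodo'
          (by
            intro x hx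
            rcases List.mem_append.mp hx with h | h
            · exact hdone x h
            · rw [List.mem_singleton] at h; subst h; exact hname)
        · intro x
          rw [c2 x, hteam x]
          constructor
          · rintro (⟨m, hm, hc⟩ | h)
            · exact ⟨m, List.mem_append.mpr (Or.inl hm), hc⟩
            · exact ⟨name, List.mem_append.mpr (Or.inr (List.mem_singleton.mpr rfl)), h⟩
          · rintro ⟨m, hm, hc⟩
            rcases List.mem_append.mp hm with h | h
            · exact Or.inl ⟨m, h, hc⟩
            · rw [List.mem_singleton] at h; subst h
              exact Or.inr hc
        · intro l
          rw [PySem.Set.mem_add, he]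
          constructor
          · rintro (⟨m, hm, hgd⟩ | h)
            · exact ⟨m, List.mem_append.mpr (Or.inl hm), hgd⟩
            · exact ⟨name, List.mem_append.mpr (Or.inr (List.mem_singleton.mpr rfl)), by rw [← hR, h]⟩
          · rintro ⟨m, hm, hgd⟩
            rcases List.mem_append.mp hm with h | h
            · exact Or.inl ⟨m, h, hgd⟩
            · rw [List.mem_singleton] at h; subst h
              exact Or.inr (by rw [← hgd, hR])

-- ===== VERDICT (by name: the statement is the Claim_ definition above) =====
theorem get_top_k_brute_force_spec : Claim_equal_get_top_k_brute_force := by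
  intro K names connections scores _hdom hpre
  unfold Spec_get_top_k_brute_force get_top_k_brute_force get_top_k_brute_force_alt
  exact pv_outer K names connections scores hpre.1 names [] (fun _ h => h) (by simp)
    PySem.Set.empty PySem.Set.empty [] (by simp [PySem.Set.empty]) (by simp [PySem.Set.empty])
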